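-- pv_equiv track=rewrite | github.com/AnshulYADAV007/weCohort4DSA | Greedy/increasing-triplet-subsequence.py | getIsRightLargerExist
-- ===== SOURCE A (Python) =====
-- def getIsRightLargerExist(nums):
--     answer = []
--     maximum = nums[-1]
--     for num in nums[::-1]:
--         if num < maximum:
--             answer.append(True)
--         else:
--             maximum = num
--             answer.append(False)
--     return answer[::-1]
-- ===== SOURCE B (Python) =====
-- def getIsRightLargerExist(nums):
--     return [any(right > v for right in nums[i + 1:]) for i, v in enumerate(nums)]
-- ===== Notes on version B (the rewrite author's own statement) =====
-- stated objective: simpler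
-- what changed: A maintains a running maximum over a reversed scan with conditional appends and a final reversal; B drops all running state and directly tests, per position, whether any element of the right-hand slice is larger (one comprehension, O(n^2) instead of O(n)).
import Mathlib
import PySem

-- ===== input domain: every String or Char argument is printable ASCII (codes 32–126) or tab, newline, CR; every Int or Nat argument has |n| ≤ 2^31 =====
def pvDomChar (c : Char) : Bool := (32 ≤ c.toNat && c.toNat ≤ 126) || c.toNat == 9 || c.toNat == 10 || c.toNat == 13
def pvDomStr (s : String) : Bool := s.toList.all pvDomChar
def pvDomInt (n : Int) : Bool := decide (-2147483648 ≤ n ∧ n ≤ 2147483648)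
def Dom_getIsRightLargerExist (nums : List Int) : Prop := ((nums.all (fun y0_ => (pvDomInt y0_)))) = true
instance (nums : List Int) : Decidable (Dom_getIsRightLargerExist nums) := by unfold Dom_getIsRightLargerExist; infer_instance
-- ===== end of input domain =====

-- B replaces A's running-maximum reverse scan (with final reversal) by a direct per-position
-- check "is any element of the right-hand slice larger" — a simpler brute-force algorithm,
-- O(n^2) instead of A's O(n).


-- ===== PORT A =====
def getIsRightLargerExist (nums : List Int) : List Bool :=
  match PySem.List.pyGet? nums (-1) with
  | none => []  -- unreachable under Pre_ (Python raises IndexError on [])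
  | some m0 =>
    let st := ((PySem.List.slice? nums none none (-1)).getD []).foldl
      (fun (s : List Bool × Int) num =>
        if num < s.2 then (s.1 ++ [true], s.2) else (s.1 ++ [false], num))
      ([], m0)
    (PySem.List.slice? st.1 none none (-1)).getD []

-- ===== PORT B =====
def getIsRightLargerExist_alt (nums : List Int) : List Bool :=
  (PySem.List.enumerate nums 0).map
    (fun p => (PySem.List.slice nums (some (p.1 + 1)) none).any (fun right => right > p.2))

-- ===== PRECONDITION & SPEC =====
-- Pre_ excludes only the empty list, on which Python A raises IndexError (nums[-1]).
def Pre_getIsRightLargerExist (nums : List Int) : Prop := nums ≠ []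
instance (nums : List Int) : Decidable (Pre_getIsRightLargerExist nums) := by unfold Pre_getIsRightLargerExist; infer_instance
def pvWitness_getIsRightLargerExist : List Int := [3, 1, 2]

def Spec_getIsRightLargerExist (nums : List Int) (out : List Bool) : Prop := out = getIsRightLargerExist_alt nums
instance (nums : List Int) (out : List Bool) : Decidable (Spec_getIsRightLargerExist nums out) := by unfold Spec_getIsRightLargerExist; infer_instance

-- ===== CLAIM (what is proved, stated in full; the proofs are below) =====
def Claim_equal_getIsRightLargerExist : Prop := ∀ (nums : List Int), Dom_getIsRightLargerExist nums → Pre_getIsRightLargerExist nums → Spec_getIsRightLargerExist nums (getIsRightLargerExist nums)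

-- ===== LEMMAS AND PROOFS =====

-- prefix-maximum table of the (already reversed) list, seeded with m: entry = running max BEFORE its element
def pvTbl (m : Int) : List Int → List Int
  | [] => []
  | x :: xs => m :: pvTbl (max m x) xs

-- the answers A produces while scanning the reversed list, seeded with m
def pvAux (m : Int) : List Int → List Bool
  | [] => []
  | x :: xs => decide (x < m) :: pvAux (max m x) xs

theorem pvTbl_length (m : Int) (l : List Int) : (pvTbl m l).length = l.length := by
  induction l generalizing m with
  | nil => rfl
  | cons x xs ih => simp [pvTbl, ih]

theorem pvAux_eq_zipWith (m : Int) (l : List Int) :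
    pvAux m l = List.zipWith (fun x s => decide (x < s)) l (pvTbl m l) := by
  induction l generalizing m with
  | nil => rfl
  | cons x xs ih => simp [pvAux, pvTbl, ih]

-- A's fold appends exactly pvAux
theorem pvFoldA (l : List Int) (acc : List Bool) (m : Int) :
    (l.foldl (fun (s : List Bool × Int) num =>
        if num < s.2 then (s.1 ++ [true], s.2) else (s.1 ++ [false], num)) (acc, m)).1
      = acc ++ pvAux m l := by
  induction l generalizing acc m with
  | nil => simp [pvAux]
  | cons x xs ih =>
    by_cases h : x < m
    · simp only [List.foldl_cons, if_pos h, ih, pvAux]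
      have : max m x = m := by omega
      simp [this, h]
    · simp only [List.foldl_cons, if_neg h, ih, pvAux]
      have : max m x = x := by omega
      simp [this, h]

theorem pvTbl_getElem (m : Int) (l : List Int) (k : Nat) (h : k < l.length) :
    (pvTbl m l)[k]'(by rw [pvTbl_length]; exact h) = (l.take k).foldl max m := by
  induction l generalizing m k with
  | nil => simp at h
  | cons x xs ih =>
    cases k with
    | zero => simp [pvTbl]
    | succ k => simpa [pvTbl] using ih (max m x) k (by simpa using h)

theorem pv_lt_foldmax (v m : Int) (s : List Int) :
    v < s.foldl max m ↔ (v < m ∨ ∃ x ∈ s, v < x) := by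
  induction s generalizing m with
  | nil => simp
  | cons x xs ih =>
    simp only [List.foldl_cons, ih, List.mem_cons]
    constructor
    · rintro (h | ⟨y, hy, hv⟩)
      · rcases lt_or_ge v m with h' | h'
        · exact Or.inl h'
        · exact Or.inr ⟨x, Or.inl rfl, by omega⟩
      · exact Or.inr ⟨y, Or.inr hy, hv⟩
    · rintro (h | ⟨y, rfl | hy, hv⟩)
      · exact Or.inl (by omega)
      · exact Or.inl (by omega)
      · exact Or.inr ⟨y, hy, hv⟩

theorem getIsRightLargerExist_spec : Claim_equal_getIsRightLargerExist := by
  intro nums _ hne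
  unfold Spec_getIsRightLargerExist getIsRightLargerExist getIsRightLargerExist_alt
  rw [PySem.List.pyGet?_neg_one, List.getLast?_eq_some_getLast (h := hne)]
  simp only [PySem.List.slice?_none_none_neg_one, Option.getD_some]
  rw [pvFoldA, List.nil_append, pvAux_eq_zipWith]
  set n := nums.length with hn
  have hn0 : 0 < n := List.length_pos_iff.mpr hne
  set m0 := nums.getLast hne with hm0
  have hm0get : m0 = nums[n - 1]'(by omega) := by
    rw [hm0, List.getLast_eq_getElem]
  -- pointwise comparison of the two sides
  apply List.ext_getElem
  · simp [pvTbl_length, PySem.List.length_enumerate]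
  · intro k h1 h2
    have hk : k < n := by
      simpa [pvTbl_length, hn] using h1
    have hkz : k < (List.zipWith (fun x s => decide (x < s)) nums.reverse
        (pvTbl m0 nums.reverse)).length := by
      simpa [pvTbl_length, hn] using hk
    have hrev : n - 1 - (n - 1 - k) = k := by omega
    rw [List.getElem_reverse, List.getElem_zipWith, List.getElem_reverse,
        List.getElem_map, PySem.List.getElem_enumerate]
    simp only [List.length_zipWith, List.length_reverse, pvTbl_length, Nat.min_self, ← hn, hrev]
    rw [pvTbl_getElem m0 nums.reverse (n - 1 - k) (by simp; omega)]
    have htake : nums.reverse.take (n - 1 - k) = (nums.drop (k + 1)).reverse := by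
      rw [List.reverse_drop]
      congr 1
      omega
    rw [htake]
    have hslice : PySem.List.slice nums (some ((0 : Int) + (k : Nat) + 1)) none
        = nums.drop (k + 1) := by
      rw [show ((0 : Int) + (k : Nat) + 1) = (((k + 1 : Nat) : Int)) by push_cast; ring,
          PySem.List.slice_from_natCast]
    rw [hslice]
    -- goal: decide (nums[k] < foldl max m0 (drop (k+1)).reverse) = (drop (k+1)).any (nums[k] < ·)
    set v := nums[k]'(by omega)
    set s := nums.drop (k + 1) with hs
    have hmem : ∀ x, x ∈ s.reverse ↔ x ∈ s := by simp
    by_cases hlast : k + 1 < n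
    · -- m0 = nums[n-1] is an element of s
      have hm0mem : m0 ∈ s := by
        rw [hm0get, hs]
        have : nums[n - 1]'(by omega) = (nums.drop (k + 1))[n - 1 - (k + 1)]'(by simp; omega) := by
          rw [List.getElem_drop]
          congr 1
          omega
        rw [this]
        exact List.getElem_mem _
      have : (v < (s.reverse).foldl max m0) ↔ ∃ x ∈ s, v < x := by
        rw [pv_lt_foldmax]
        constructor
        · rintro (h | ⟨x, hx, hv⟩)
          · exact ⟨m0, hm0mem, h⟩
          · exact ⟨x, (hmem x).mp hx, hv⟩
        · rintro ⟨x, hx, hv⟩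
          exact Or.inr ⟨x, (hmem x).mpr hx, hv⟩
      have hany : (s.any fun right => decide (right > v)) = decide (∃ x ∈ s, v < x) := by
        rw [Bool.eq_iff_iff]
        simp
      rw [hany, decide_eq_decide]
      exact this
    · -- k = n - 1: empty suffix, m0 = v
      have hkeq : k = n - 1 := by omega
      have hsnil : s = [] := by
        rw [hs]
        apply List.drop_eq_nil_of_le
        omega
      have hveq : v = m0 := by
        have h9 : nums[k]? = nums[n - 1]? := by rw [hkeq]
        rw [List.getElem?_eq_getElem (by omega), List.getElem?_eq_getElem (by omega),
            Option.some_inj] at h9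
        rw [hm0get, ← h9]
      rw [hsnil, hveq]
      simp
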